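-- pv_equiv track=rewrite | github.com/YuJeeun/Baekjoon_python | 프로그래머스/3/12938. 최고의 집합/최고의 집합.py | solution
-- ===== SOURCE A (Python) =====
-- def solution(n, s):
--     answer = []
--
--     if s//n <= 0: return [-1]
--
--     for _ in range(n):
--         answer.append(s//n)
--
--     r = s%n
--
--     for i in range(len(answer)):
--         if r == 0: break
--         answer[i] += 1
--         r -= 1
--
--     answer.sort()
--
--     return answer
-- ===== SOURCE B (Python) =====
-- def solution(n, s):
--     if s // n <= 0:
--         return [-1]
--     return [(s + i) // n for i in range(n)]
-- ===== Notes on version B (the rewrite author's own statement) =====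
-- stated objective: simpler
-- what changed: Replaces fill-then-distribute-remainder-then-sort with a direct closed-form per-index value (s+i)//n, which is already sorted; no mutation, no remainder loop, no sort.
import Mathlib
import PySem

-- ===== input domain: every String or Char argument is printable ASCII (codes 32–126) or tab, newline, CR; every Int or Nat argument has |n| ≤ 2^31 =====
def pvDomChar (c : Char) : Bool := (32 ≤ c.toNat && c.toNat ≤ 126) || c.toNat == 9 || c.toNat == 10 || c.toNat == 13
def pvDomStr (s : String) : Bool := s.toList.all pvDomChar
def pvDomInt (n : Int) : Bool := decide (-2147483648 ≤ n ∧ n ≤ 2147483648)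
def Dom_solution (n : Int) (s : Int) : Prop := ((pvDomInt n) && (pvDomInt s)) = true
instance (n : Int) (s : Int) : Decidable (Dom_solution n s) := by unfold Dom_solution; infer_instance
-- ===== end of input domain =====

-- B replaces A's fill / distribute-remainder / sort with the closed-form per-index value (s+i)//n
-- (already sorted), for a simpler single comprehension. Pre_ excludes only n = 0, where A raises
-- ZeroDivisionError (B raises there too).

-- ===== PORT A =====
-- the second Python loop: 'for i in range(len(answer)): if r == 0: break; answer[i] += 1; r -= 1'
def solAIncLoop (answer : List Int) (r : Int) : List Int :=
  match answer with
  | [] => []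
  | x :: xs => if r == 0 then x :: xs else (x + 1) :: solAIncLoop xs (r - 1)

def solution (n : Int) (s : Int) : List Int :=
  if PySem.Int.floordiv s n ≤ 0 then [-1]
  else
    let answer := (PySem.List.pyRange 0 n 1).foldl
      (fun acc _ => acc ++ [PySem.Int.floordiv s n]) []
    let r := PySem.Int.mod s n
    let answer := solAIncLoop answer r
    PySem.List.sorted answer (fun x => x) false

-- ===== PORT B =====
def solution_alt (n : Int) (s : Int) : List Int :=
  if PySem.Int.floordiv s n ≤ 0 then [-1]
  else (PySem.List.pyRange 0 n 1).map (fun i => PySem.Int.floordiv (s + i) n)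

-- ===== PRECONDITION & SPEC =====
-- Pre_ excludes only n = 0, where Python's s//n raises ZeroDivisionError in both A and B.
def Pre_solution (n : Int) (_s : Int) : Prop := n ≠ 0
instance (n : Int) (s : Int) : Decidable (Pre_solution n s) := by unfold Pre_solution; infer_instance
def pvWitness_solution : Int × Int := (3, 7)

def Spec_solution (n : Int) (s : Int) (out : List Int) : Prop := out = solution_alt n s
instance (n : Int) (s : Int) (out : List Int) : Decidable (Spec_solution n s out) := by unfold Spec_solution; infer_instance

-- ===== CLAIM (what is proved, stated in full; the proofs are below) =====
def Claim_equal_solution : Prop := ∀ (n : Int) (s : Int), Dom_solution n s → Pre_solution n s → Spec_solution n s (solution n s)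

-- ===== LEMMAS AND PROOFS =====

lemma solAIncLoop_replicate (m : Nat) (q r : Int) (hr : 0 ≤ r) (hm : r.toNat ≤ m) :
    solAIncLoop (List.replicate m q) r =
      List.replicate r.toNat (q + 1) ++ List.replicate (m - r.toNat) q := by
  induction m generalizing r with
  | zero =>
    have : r = 0 := by omega
    subst this
    simp [solAIncLoop]
  | succ k ih =>
    by_cases h0 : r = 0
    · subst h0; simp [solAIncLoop, List.replicate_succ]
    · have hr1 : 0 ≤ r - 1 := by omega
      have hm1 : (r - 1).toNat ≤ k := by omega
      have ht : r.toNat = (r - 1).toNat + 1 := by omega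
      rw [List.replicate_succ]
      simp only [solAIncLoop, beq_iff_eq, h0, if_false]
      rw [ih (r - 1) hr1 hm1, ht, List.replicate_succ]
      have hk : k + 1 - ((r - 1).toNat + 1) = k - (r - 1).toNat := by omega
      simp only [List.cons_append, hk]

lemma map_const_of_forall {α β : Type} (l : List α) (f : α → β) (c : β)
    (h : ∀ x ∈ l, f x = c) : l.map f = List.replicate l.length c := by
  induction l with
  | nil => simp
  | cons a t ih =>
    simp only [List.map, List.length_cons, List.replicate_succ]
    rw [h a (by simp), ih (fun x hx => h x (by simp [hx]))]

-- ===== VERDICT (by name: the statement is the Claim_ definition above) =====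
theorem solution_spec : Claim_equal_solution := by
  intro n s _ hpre
  unfold Spec_solution solution solution_alt
  by_cases hg : PySem.Int.floordiv s n ≤ 0
  · simp [hg]
  · simp only [hg, if_false]
    rcases lt_or_gt_of_ne hpre with hn | hn
    · -- n < 0: range(n) is empty on both sides
      rw [PySem.List.pyRange_one_eq_nil (by omega)]
      simp [solAIncLoop, PySem.List.sorted]
    · -- n > 0
      set q := PySem.Int.floordiv s n with hq
      set r := PySem.Int.mod s n with hrdef
      have hsr : q * n + r = s := PySem.Int.floordiv_mul_add_mod s n
      have hr0 : 0 ≤ r := PySem.Int.mod_nonneg s hn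
      have hrn : r < n := PySem.Int.mod_lt s hn
      -- A side: the fill loop produces replicate n.toNat q
      rw [PySem.List.foldl_append_singleton_eq_map]
      have hfill : (PySem.List.pyRange 0 n 1).map (fun _ => q) =
          List.replicate n.toNat q := by
        rw [map_const_of_forall _ _ q (fun _ _ => rfl),
            PySem.List.length_pyRange_one]
        norm_num
      rw [List.nil_append, hfill,
          solAIncLoop_replicate n.toNat q r hr0 (by omega)]
      -- A side: sorting the (q+1)s-then-qs list gives qs then (q+1)s
      have hsorted :
          PySem.List.sorted
            (List.replicate r.toNat (q + 1) ++ List.replicate (n.toNat - r.toNat) q)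
            (fun x => x) false =
          List.replicate (n.toNat - r.toNat) q ++ List.replicate r.toNat (q + 1) := by
        apply PySem.List.sorted_id_eq_of_perm_of_pairwise
        · exact List.perm_append_comm
        · apply List.pairwise_append.2
          refine ⟨List.pairwise_replicate.2 ?_, List.pairwise_replicate.2 ?_, ?_⟩
          · exact Or.inr le_rfl
          · exact Or.inr le_rfl
          · intro a ha b hb
            rw [List.eq_of_mem_replicate ha, List.eq_of_mem_replicate hb]
            omega
      rw [hsorted]
      -- B side: split the range at n - r
      rw [PySem.List.pyRange_one_append 0 (n - r) n (by omega) (by omega),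
          List.map_append]
      congr 1
      · rw [map_const_of_forall _ _ q ?_, PySem.List.length_pyRange_one]
        · congr 1; omega
        · intro i hi
          rw [PySem.List.mem_pyRange_one] at hi
          rw [PySem.Int.floordiv_eq_iff_of_pos hn]
          constructor <;> nlinarith
      · rw [map_const_of_forall _ _ (q + 1) ?_, PySem.List.length_pyRange_one]
        · congr 1; omega
        · intro i hi
          rw [PySem.List.mem_pyRange_one] at hi
          rw [PySem.Int.floordiv_eq_iff_of_pos hn]
          constructor <;> nlinarith
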